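-- pv_equiv track=rewrite | github.com/chadadomar/ProblemSolving | copy 1.py | Nv
-- ===== SOURCE A (Python) =====
-- def Nv(L):
--     sum=index=0
--     if len(L)==0:
--         return 0
--     else:
--         for i in range(len(L)):
--             if L[i]=='0':
--                 sum+=i-index
--                 index+=1
--         return sum
-- ===== SOURCE B (Python) =====
-- def Nv(L):
--     z = L.count('0')
--     P = sum(i for i, c in enumerate(L) if c == '0')
--     return P - z * (z - 1) // 2
-- ===== Notes on version B (the rewrite author's own statement) =====
-- stated objective: simpler
-- what changed: Replaces the per-zero running-subtraction loop with a closed form: sum of zero positions minus the triangular number z*(z-1)//2, using count and an enumerate-sum.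
import Mathlib
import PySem

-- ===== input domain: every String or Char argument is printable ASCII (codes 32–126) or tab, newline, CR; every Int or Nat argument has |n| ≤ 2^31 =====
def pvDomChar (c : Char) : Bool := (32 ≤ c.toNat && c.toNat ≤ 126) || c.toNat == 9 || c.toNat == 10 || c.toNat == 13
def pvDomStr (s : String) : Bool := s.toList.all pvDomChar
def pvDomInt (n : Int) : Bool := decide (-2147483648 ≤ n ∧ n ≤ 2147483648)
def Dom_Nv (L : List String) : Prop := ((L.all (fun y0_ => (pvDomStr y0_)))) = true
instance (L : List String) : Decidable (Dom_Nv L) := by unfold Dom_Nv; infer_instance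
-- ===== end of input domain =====

-- B replaces A's running per-zero subtraction loop by a closed form: (sum of the
-- positions holding "0") minus the triangular number z*(z-1)//2 (objective: simpler).

-- ===== PORT A =====
def Nv (L : List String) : Int :=
  if L.length = 0 then 0
  else
    ((PySem.List.pyRange 0 (PySem.List.len L)).foldl
      (fun (st : Int × Int) i =>
        if PySem.List.pyGetD L i "" = "0" then (st.1 + (i - st.2), st.2 + 1) else st)
      (0, 0)).1

-- ===== PORT B =====
def Nv_alt (L : List String) : Int :=
  let z : Int := (PySem.List.count L "0" : Int)
  let P : Int := (((PySem.List.enumerate L).filter (fun p => p.2 == "0")).map (fun p => p.1)).sum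
  P - PySem.Int.floordiv (z * (z - 1)) 2

-- ===== PRECONDITION & SPEC =====
def Spec_Nv (L : List String) (out : Int) : Prop := out = Nv_alt L
instance (L : List String) (out : Int) : Decidable (Spec_Nv L out) := by unfold Spec_Nv; infer_instance

-- ===== CLAIM (what is proved, stated in full; the proofs are below) =====
def Claim_equal_Nv : Prop := ∀ (L : List String), Dom_Nv L → Spec_Nv L (Nv L)

-- ===== LEMMAS AND PROOFS =====

-- triangular number 0 + 1 + … + (n-1), as an Int
def triI : Nat → Int
  | 0 => 0
  | n + 1 => triI n + n

lemma two_mul_triI (n : Nat) : (n : Int) * ((n : Int) - 1) = 2 * triI n := by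
  induction n with
  | zero => simp [triI]
  | succ m ih =>
    have : (2 : Int) * triI (m + 1) = 2 * triI m + 2 * m := by simp [triI]; ring
    rw [this, ← ih]
    push_cast
    ring

-- A's loop over enumerate l s, started in state acc, in closed form
lemma loopA (l : List String) : ∀ (s : Int) (acc : Int × Int),
    (PySem.List.enumerate l s).foldl
      (fun (st : Int × Int) p =>
        if p.2 = "0" then (st.1 + (p.1 - st.2), st.2 + 1) else st) acc
    = (acc.1 + (((PySem.List.enumerate l s).filter (fun p => p.2 == "0")).map (fun p => p.1)).sum
         - (l.count "0" : Int) * acc.2 - triI (l.count "0"),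
       acc.2 + (l.count "0" : Int)) := by
  induction l with
  | nil => intro s acc; simp [PySem.List.enumerate, triI]
  | cons x t ih =>
    intro s acc
    rw [PySem.List.enumerate_cons]
    by_cases h : x = "0"
    · subst h
      simp only [List.foldl_cons, List.filter_cons, List.count_cons]
      rw [ih]
      simp only [beq_self_eq_true, if_pos, List.map_cons, List.sum_cons, triI]
      refine Prod.ext ?_ ?_ <;> · simp; ring_nf
    · simp only [List.foldl_cons, if_neg h, List.filter_cons, List.count_cons]
      rw [ih]
      have hb : (x == "0") = false := beq_eq_false_iff_ne.mpr h
      simp [hb]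

-- ===== VERDICT (by name: the statement is the Claim_ definition above) =====
theorem Nv_spec : Claim_equal_Nv := by
  intro L _
  show Nv L = Nv_alt L
  unfold Nv Nv_alt
  have hfd : PySem.Int.floordiv ((L.count "0" : Int) * ((L.count "0" : Int) - 1)) 2
      = triI (L.count "0") := by
    rw [two_mul_triI, PySem.Int.floordiv_eq_ediv_of_pos (by norm_num)]
    exact Int.mul_ediv_cancel_left _ (by norm_num)
  rcases L with _ | ⟨x, t⟩
  · simp [PySem.List.enumerate, PySem.Int.floordiv]
  · rw [if_neg (by simp)]
    have h1 := loopA (x :: t) 0 (0, 0)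
    rw [PySem.List.enumerate_eq_map_pyRange (x :: t) "", List.foldl_map] at h1
    simp only [] at h1 ⊢
    rw [h1]
    simp only [PySem.List.count_eq] at hfd ⊢
    rw [hfd, PySem.List.enumerate_eq_map_pyRange (x :: t) ""]
    ring
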